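/-
  THE SEGMENTS OF `DGifGetCodeNext` (dgif_lib.c:779-808; 76 instructions; a PROTECTED frame: the byte `Buf`): the assertions at
  its cut points, the segment claims, and the COMPOSITION (segments ⇒ `DGifGetCodeNext.spec`), proved here. The template is
  `DGifGetWord` (Gif/Spec/ReaderSegs.lean); the function is `DGifGetExtensionNext` (Gif/Spec/Seg_DGifGetExtensionNext.lean) with two
  more stores on the terminator arm (`pv.Buf[0] = 0`, `pv.PixelCount = 0`).

      unit                    addresses                                  instructions   calls
      DGifGetCodeNext.P       109F40H … 109F8CH                          16             —
      DGifGetCodeNext.1       109F8CH … 109FC6H                          13             InternalRead; the checks load8, store4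
      DGifGetCodeNext.2       109FE3H … 10A086H                          37             InternalRead; the checks store8, store1, store4
      DGifGetCodeNext.E       109FC6H … 109FE3H                          10             —

  THE FRAME: six pushes (`r15 r14 r13 r12 rbp rbx`), `sub rsp, 88`: `rsp = RA − 136` (`RA` = the entry's `rsp`); the protected
  frame's base is `RA − 120` (`[rsp + 10H]`), 64 bytes; its object `Buf` is the byte at `RA − 88` (`[rsp + 30H]`); `[rsp + 8]`
  (`RA − 128`) is a spill slot (the address `&pv.Buf` across the check call at 10A02EH). The registers of the body: `rbx = gif`,
  `r13 = CodeBlock`, `rbp` = the shadow index `(RA − 120) >> 3`; from 109F95H on `r14 = pv`; `r15b` = the length byte (segment 2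
  only); `r12d` = THE RESULT (the epilogue does `mov eax, r12d`).

  `*CodeBlock` IS NOT INSIDE pv: segment 2 stores `&pv.Buf` to `*CodeBlock`, then `Buf[0] = n`, then READS `*CodeBlock` AGAIN
  (10A048H) to form the buffer of the second `InternalRead`; the post reads `*CodeBlock` after that call (and, on the terminator
  arm, after the stores to `pv.Buf[0]` and `pv.PixelCount`). `BufOK.loose` alone admits a `CodeBlock` inside `pv`
  (`[pv + 4, pv + 64)`, `[pv + 80, …)`); the precondition's `OutPtr.low` (`CodeBlock + 8 ≤ 800000H`: a STACK address; the only
  caller, DGifGetLine, passes its stack object `Dummy`) excludes it. Every assertion carries `pre`, and segment 2 takes the fact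
  from there.
-/
import Gif.Spec.Reader
import Gif.LabelsAt
namespace Gif.Spec
open X86 X86.User Asan ProgX.Base ProgX.Base.Spec

namespace DGifGetCodeNext

/-- The active frames inside the body: the function's own protected frame (`base = RA − 120`), innermost. -/
abbrev framesIn (frames : List (Nat × FrameLayout)) (e : State) : List (Nat × FrameLayout) :=
  ((e.reg .rsp).toNat - 120, Gif.Frames.DGifGetCodeNext) :: frames

/-- **IN THE BODY of `DGifGetCodeNext`**, at the address `cut`, inside the call that was entered at the state `e` (return address
`ret`) with the function's precondition. The prologue is done. -/
structure Body (cut : Word) (H : Heap) (rest : List Obj) (frames : List (Nat × FrameLayout)) (F : Forest) (R : Rd) (u₀ e : State)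
    (ret : Word) (v : State) : Prop where
  /-- the function was entered at `e` … -/
  entry : AtEntry (conv u₀) Gif.L.DGifGetCodeNext.entry (DGifGetCodeNext.spec H rest frames F R).frame ret e
  /-- … with its precondition -/
  pre : (DGifGetCodeNext.spec H rest frames F R).pre e
  /-- `*CodeBlock` (8 bytes of a live object at or above 700000H) lies above the return-address slot: a store through
  `CodeBlock` meets neither the function's own stack (`Buf`, the spill slot, the saved registers) nor the return address. (A
  consequence of `entry` and `pre`, stated once.) -/
  block_above : (e.reg .rsp).toNat + 8 ≤ (e.reg .rsi).toNat
  rip : v.rip = cut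
  /-- six pushes and `sub rsp, 88` -/
  rsp : v.reg .rsp = e.reg .rsp - 136
  /-- `mov rbx, rdi`: gif -/
  rbx : v.reg .rbx = e.reg .rdi
  /-- `mov r13, rsi`: CodeBlock -/
  r13 : v.reg .r13 = e.reg .rsi
  /-- `lea rbp, [rsp + 10H] ; shr rbp, 3`: the shadow index of the frame -/
  rbp : v.reg .rbp = (e.reg .rsp - 120) >>> 3
  /-- the saved registers, in push order (`r15 r14 r13 r12 rbp rbx`): the pops 109FD8H … 109FE0H restore them -/
  slot_r15 : v.mem.readLE (e.reg .rsp - 8) 8 = (e.reg .r15).toNat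
  slot_r14 : v.mem.readLE (e.reg .rsp - 16) 8 = (e.reg .r14).toNat
  slot_r13 : v.mem.readLE (e.reg .rsp - 24) 8 = (e.reg .r13).toNat
  slot_r12 : v.mem.readLE (e.reg .rsp - 32) 8 = (e.reg .r12).toNat
  slot_rbp : v.mem.readLE (e.reg .rsp - 40) 8 = (e.reg .rbp).toNat
  slot_rbx : v.mem.readLE (e.reg .rsp - 48) 8 = (e.reg .rbx).toNat
  /-- the return-address slot `[RA, RA + 8)` still holds `ret` (no store of the function or of a callee goes there): the `ret`
  at 109FE2H pops it -/
  slot_ra : UInt64.ofNat (v.mem.readLE (e.reg .rsp) 8) = ret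
  /-- the heap's invariant, with the function's OWN frame pushed; the clean stack ends at the body's `rsp` -/
  inv : HeapInv H rest (framesIn frames e) ((e.reg .rsp).toNat - 136) v.mem
  /-- the state invariant -/
  ok : GifOK H F R v.mem
  /-- the reader did not go back -/
  rem : rem R v.mem ≤ rem R e.mem
  /-- nothing was written but the function's stack, the 8 shadow bytes of its frame, and the contract's windows -/
  same : Mem.SameExcept
    [⟨(e.reg .rsp).toNat - 320, (e.reg .rsp).toNat⟩,
     shadowSpan ((e.reg .rsp).toNat - 120) ((e.reg .rsp).toNat - 56),
     ⟨F.pv + 56, F.pv + 64⟩,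
     ⟨F.pv + 88, F.pv + 344⟩,
     ⟨(e.reg .rsi).toNat, (e.reg .rsi).toNat + 8⟩,
     ⟨F.gif + 96, F.gif + 100⟩,
     ⟨R.cur, R.cur + 8⟩] e.mem v.mem
  code : (conv u₀).code.In v.mem
  abi : (conv u₀).inv v

/-- **AFTER THE PROLOGUE** (at 109F8CH, `lea rdi, [rdi + 70H]`, l.781): `Body`, and `rdi` still holds gif. -/
structure Start (H : Heap) (rest : List Obj) (frames : List (Nat × FrameLayout)) (F : Forest) (R : Rd) (u₀ e : State)
    (ret : Word) (v : State) : Prop where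
  body : Body Gif.L.DGifGetCodeNext.at_109f8c H rest frames F R u₀ e ret v
  /-- the prologue did not change `rdi` -/
  rdi : v.reg .rdi = e.reg .rdi
  /-- the prologue did not move the reader: EXACTLY (the posts count the bytes consumed from the entry; `Body.rem` alone, an
  inequality, would not give `rem + 1 = rem₀` after the first read) -/
  rem_eq : rem R v.mem = rem R e.mem

/-- **AFTER THE LENGTH BYTE** (at 109FE3H, `mov r12d, eax`, the target of the `je` of l.785): `InternalRead(gif, &Buf, 1)` returned
1: `rax = 1` (it becomes the result), `r14 = pv` (`mov r14, [rbx + 70H]`), and the reader advanced by exactly one byte. The value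
of `Buf` (the byte at `RA − 88`) is ANYTHING. -/
structure AfterLen (H : Heap) (rest : List Obj) (frames : List (Nat × FrameLayout)) (F : Forest) (R : Rd) (u₀ e : State)
    (ret : Word) (v : State) : Prop where
  body : Body Gif.L.DGifGetCodeNext.at_109fe3 H rest frames F R u₀ e ret v
  /-- the result of the first read -/
  rax : (v.reg .rax).toNat = 1
  /-- `Private`, loaded at 109F95H -/
  r14 : (v.reg .r14).toNat = F.pv
  /-- `ReadPost` with `k = n = 1` -/
  rem_eq : rem R v.mem + 1 = rem R e.mem

/-- **BEFORE THE EPILOGUE** (at 109FC6H, the store that clears the frame's shadow): `Body`, THE RESULT IN `r12` (zero-extended: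
`mov r12d, eax` with `rax = 1`, or `mov r12d, 0`), and the contract's postcondition stated of the present memory. -/
structure Done (H : Heap) (rest : List Obj) (frames : List (Nat × FrameLayout)) (F : Forest) (R : Rd) (u₀ e : State)
    (ret : Word) (v : State) : Prop where
  body : Body Gif.L.DGifGetCodeNext.at_109fc6 H rest frames F R u₀ e ret v
  /-- GIF_OK (1) or GIF_ERROR (0), in `r12` -/
  res : (v.reg .r12).toNat = 1 ∨ (v.reg .r12).toNat = 0
  /-- GIF_OK: `*CodeBlock` is NULL or `&pv.Buf`, and at least one byte was consumed -/
  ok1 : (v.reg .r12).toNat = 1 →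
    (rd v.mem (e.reg .rsi).toNat 8 = 0 ∨ rd v.mem (e.reg .rsi).toNat 8 = F.pv + 88) ∧
    rem R v.mem + 1 ≤ rem R e.mem

/-- **Segment P** (the prologue, 109F40H … 109F8CH, 16 instructions): six pushes, `sub rsp, 88`, the two argument moves, the
frame's three header words, the shadow index, the two poison stores. -/
def SegP (Lay : Layout) (μ : Microarch) (u₀ : State) : Prop :=
  ∀ (H : Heap) (rest : List Obj) (frames : List (Nat × FrameLayout)) (F : Forest) (R : Rd) (e : State) (ret : Word),
    AtEntry (conv u₀) Gif.L.DGifGetCodeNext.entry (DGifGetCodeNext.spec H rest frames F R).frame ret e →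
    (DGifGetCodeNext.spec H rest frames F R).pre e →
    ReachVia Lay μ WayInv e (Start H rest frames F R u₀ e ret)

/-- **Segment 1** (109F8CH … 109FC6H, 13 instructions; l.781-788): the checked load of `gif.Private` (`r14 = pv`);
`InternalRead(gif, &Buf, 1)` into the frame's object `Buf` (`BufOK`: `LiveIn` through the own frame's object, `Loose.stack` below
the cursor, `HeapWin.offHeap`); 1: `AfterLen`; not 1: l.786, the checked store of `gif.Error`, `r12d = 0`: `Done`. -/
def Seg1 (Lay : Layout) (μ : Microarch) (u₀ : State) : Prop :=
  ∀ (H : Heap) (rest : List Obj) (frames : List (Nat × FrameLayout)) (F : Forest) (R : Rd) (e : State) (ret : Word) (v : State),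
    Start H rest frames F R u₀ e ret v →
    ReachVia Lay μ WayInv v (fun w => Done H rest frames F R u₀ e ret w ∨ AfterLen H rest frames F R u₀ e ret w)

/-- **Segment 2** (109FE3H … 10A086H, 37 instructions; l.791-807): `r12d = 1`; `Buf = 0`: the checked stores `*CodeBlock = NULL`,
`pv.Buf[0] = 0` (`pv + 88`), `pv.PixelCount = 0` (`[pv + 56, pv + 64)`: the `pv` case of `Loose`); `Buf = n > 0`: the checked
stores `*CodeBlock = &pv.Buf` (`pv + 88`, through the spill slot) and `pv.Buf[0] = n`, the re-load of `*CodeBlock` (it IS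
`pv + 88`: `OutPtr.low` of the pre, see the header), `InternalRead(gif, pv + 89, n)` (`BufOK`: `bufLive` with `1 + n ≤ 256`, the `pv` case of
`Loose`, `HeapWin.live`), the comparison of its result with `Buf` re-read from the frame: equal: `k = n ≥ 1`; else l.797, the
checked store of `gif.Error`, `r12d = 0`. -/
def Seg2 (Lay : Layout) (μ : Microarch) (u₀ : State) : Prop :=
  ∀ (H : Heap) (rest : List Obj) (frames : List (Nat × FrameLayout)) (F : Forest) (R : Rd) (e : State) (ret : Word) (v : State),
    AfterLen H rest frames F R u₀ e ret v →
    ReachVia Lay μ WayInv v (Done H rest frames F R u₀ e ret)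

/-- **Segment E** (the epilogue, 109FC6H … 109FE3H, 10 instructions): the 8-byte store that clears the frame's shadow,
`mov eax, r12d`, `add rsp, 88`, six pops, `ret`. -/
def SegE (Lay : Layout) (μ : Microarch) (u₀ : State) : Prop :=
  ∀ (H : Heap) (rest : List Obj) (frames : List (Nat × FrameLayout)) (F : Forest) (R : Rd) (e : State) (ret : Word) (v : State),
    Done H rest frames F R u₀ e ret v →
    ReachVia Lay μ WayInv v (Returned (conv u₀) (DGifGetCodeNext.spec H rest frames F R) e ret)

/-- **The composition of `DGifGetCodeNext`**: P, then 1, which ends before the epilogue or goes on with 2; then E. -/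
theorem compose {Lay : Layout} {μ : Microarch} {u₀ : State} (hP : SegP Lay μ u₀) (h1 : Seg1 Lay μ u₀) (h2 : Seg2 Lay μ u₀)
    (hE : SegE Lay μ u₀) :
    ∀ (H : Heap) (rest : List Obj) (frames : List (Nat × FrameLayout)) (F : Forest) (R : Rd),
      Calls Lay μ WayInv (conv u₀) Gif.L.DGifGetCodeNext.entry (DGifGetCodeNext.spec H rest frames F R) := by
  intro H rest frames F R e ret he hp
  refine (hP H rest frames F R e ret he hp).trans ?_
  intro v hv
  refine (h1 H rest frames F R e ret v hv).trans ?_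
  intro w hw
  rcases hw with hdone | hlen
  · exact hE H rest frames F R e ret w hdone
  · refine (h2 H rest frames F R e ret w hlen).trans ?_
    intro x hx
    exact hE H rest frames F R e ret x hx

end DGifGetCodeNext

end Gif.Spec
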